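-- pv_equiv track=rewrite | github.com/zhuofupan/Pytorch-Deep-Neural-Networks | core/plot.py | _get_categories_name
-- ===== SOURCE A (Python) =====
-- def _get_categories_name(label, N):
--     _labels = []
--     if type(label)!= list: label = [label]
--     for i in range(N):
--         if label[0] is not None:
--             if len(label) < N  and i >= len(label) - 1:
--                 _labels.append(label[-1] + ' ' + str(i - len(label) + 2))
--             else:
--                 _labels.append(label[i])
--         else:
--             _labels.append('Category ' + str(i + 1))
--     return _labels
-- ===== SOURCE B (Python) =====
-- def _get_categories_name(label, N):
--     if type(label) != list: label = [label]
--     if N <= 0: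
--         return []
--     if label[0] is None:
--         head, base = [], 'Category'
--     else:
--         head = label[:N]
--         if len(head) == N:
--             return head
--         base = head.pop()
--     tail = [None] * (N - len(head))
--     for i in range(len(tail)):
--         tail[i] = base + ' ' + str(i + 1)
--     return head + tail
-- ===== Notes on version B (the rewrite author's own statement) =====
-- stated objective: alternative
-- what changed: B replaces A's per-index loop with three branch tests per iteration by a truncate-or-pop plus preallocate-and-fill scheme: it returns label[:N] if that is already full, otherwise pops the last element (or starts empty with base 'Category'), preallocates the numbered tail once and fills tail[i] = base + ' ' + str(i+1) by index, so no loop ever indexes label or re-tests A's branch conditions.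
-- outside the precondition, e.g. on _get_categories_name(['a', None], 2): A returns ['a', None], B returns ['a', None]; on _get_categories_name([], 2): A raises IndexError, B raises IndexError
import Mathlib
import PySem

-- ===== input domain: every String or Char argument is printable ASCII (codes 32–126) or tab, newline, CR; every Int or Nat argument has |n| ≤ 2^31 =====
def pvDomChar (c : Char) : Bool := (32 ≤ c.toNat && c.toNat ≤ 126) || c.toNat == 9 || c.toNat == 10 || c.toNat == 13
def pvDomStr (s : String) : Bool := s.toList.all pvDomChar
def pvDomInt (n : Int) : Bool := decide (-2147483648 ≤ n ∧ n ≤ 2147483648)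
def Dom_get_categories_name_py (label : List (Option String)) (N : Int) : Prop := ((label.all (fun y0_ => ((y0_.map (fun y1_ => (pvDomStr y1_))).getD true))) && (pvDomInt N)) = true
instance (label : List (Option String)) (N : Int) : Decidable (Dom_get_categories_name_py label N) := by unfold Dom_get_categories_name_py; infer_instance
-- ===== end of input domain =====

-- B replaces A's per-index branching loop by truncate-or-pop plus a preallocated, index-filled numbered tail (objective: alternative).


-- ===== PORT A =====
-- literal transliteration of A's loop; pyGetD's defaults stand in exactly where
-- Python would raise (IndexError / TypeError on None), which Pre_ excludes
def get_categories_name_py (label : List (Option String)) (N : Int) : List String :=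
  (PySem.List.pyRange 0 N 1).foldl (fun acc i =>
    if (PySem.List.pyGetD label 0 none).isSome then
      if (label.length : Int) < N ∧ (label.length : Int) - 1 ≤ i then
        acc ++ [(PySem.List.pyGetD label (-1) none).getD "" ++ " " ++ PySem.Int.toStr (i - label.length + 2)]
      else
        acc ++ [(PySem.List.pyGetD label i none).getD ""]
    else
      acc ++ ["Category " ++ PySem.Int.toStr (i + 1)]) []

-- ===== PORT B =====
-- Source B's preallocate-and-fill tail: tail[i] = base + ' ' + str(i+1) for i in range(N - len(head))
def pvFill (base : String) (k : Int) : List String :=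
  (PySem.List.pyRange 0 k 1).map (fun i => base ++ " " ++ PySem.Int.toStr (i + 1))

def get_categories_name_py_alt (label : List (Option String)) (N : Int) : List String :=
  if N ≤ 0 then []
  else if PySem.List.pyGetD label 0 none = none then
    pvFill "Category" N
  else
    let head := (PySem.List.slice label none (some N)).map (fun o => o.getD "")
    if (head.length : Int) = N then head
    else head.dropLast ++ pvFill (head.getLastD "") (N - (head.dropLast.length : Int))

-- ===== PRECONDITION & SPEC =====
-- Pre_ excludes exactly the inputs where Python A does not return a List[str]:
-- N > 0 with an empty label (label[0] raises IndexError), and a label whose head is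
-- not None but whose used prefix contains a None (A returns a list containing None /
-- raises TypeError on None + str); B behaves identically there.
def Pre_get_categories_name_py (label : List (Option String)) (N : Int) : Prop :=
  N ≤ 0 ∨ (label ≠ [] ∧ (label.head? = some none ∨ ∀ x ∈ label.take N.toNat, x ≠ none))
instance (label : List (Option String)) (N : Int) : Decidable (Pre_get_categories_name_py label N) := by unfold Pre_get_categories_name_py; infer_instance
def pvWitness_get_categories_name_py : List (Option String) × Int := ([some "a"], 3)
def Spec_get_categories_name_py (label : List (Option String)) (N : Int) (out : List String) : Prop := out = get_categories_name_py_alt label N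
instance (label : List (Option String)) (N : Int) (out : List String) : Decidable (Spec_get_categories_name_py label N out) := by unfold Spec_get_categories_name_py; infer_instance

-- ===== CLAIM (what is proved, stated in full; the proofs are below) =====
def Claim_equal_get_categories_name_py : Prop := ∀ (label : List (Option String)) (N : Int), Dom_get_categories_name_py label N → Pre_get_categories_name_py label N → Spec_get_categories_name_py label N (get_categories_name_py label N)

-- ===== LEMMAS AND PROOFS =====

-- the element A's loop appends at iteration i
def pvF (label : List (Option String)) (N : Int) (i : Int) : String :=
  if (PySem.List.pyGetD label 0 none).isSome then
    if (label.length : Int) < N ∧ (label.length : Int) - 1 ≤ i then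
      (PySem.List.pyGetD label (-1) none).getD "" ++ " " ++ PySem.Int.toStr (i - label.length + 2)
    else
      (PySem.List.pyGetD label i none).getD ""
  else
    "Category " ++ PySem.Int.toStr (i + 1)

lemma get_categories_name_py_eq_map (label : List (Option String)) (N : Int) :
    get_categories_name_py label N = (PySem.List.pyRange 0 N 1).map (pvF label N) := by
  unfold get_categories_name_py
  have h : (fun (acc : List String) (i : Int) =>
      if (PySem.List.pyGetD label 0 none).isSome then
        if (label.length : Int) < N ∧ (label.length : Int) - 1 ≤ i then
          acc ++ [(PySem.List.pyGetD label (-1) none).getD "" ++ " " ++ PySem.Int.toStr (i - label.length + 2)]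
        else
          acc ++ [(PySem.List.pyGetD label i none).getD ""]
      else
        acc ++ ["Category " ++ PySem.Int.toStr (i + 1)])
      = (fun acc i => acc ++ [pvF label N i]) := by
    funext acc i
    unfold pvF
    split_ifs <;> rfl
  rw [h, PySem.List.foldl_append_singleton_eq_map]
  simp

lemma pvF_cat (rest : List (Option String)) (N i : Int) :
    pvF (none :: rest) N i = "Category " ++ PySem.Int.toStr (i + 1) := by
  unfold pvF
  rw [PySem.List.pyGetD_zero_cons]
  simp

lemma pvF_idx (s : String) (rest : List (Option String)) (N i : Int)
    (h : ¬ ((((some s :: rest).length : Int)) < N ∧ (((some s :: rest).length : Int)) - 1 ≤ i)) :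
    pvF (some s :: rest) N i = (PySem.List.pyGetD (some s :: rest) i none).getD "" := by
  unfold pvF
  rw [PySem.List.pyGetD_zero_cons, if_pos (by simp), if_neg h]

lemma pvF_tail (s : String) (rest : List (Option String)) (N i : Int)
    (h : (((some s :: rest).length : Int)) < N ∧ (((some s :: rest).length : Int)) - 1 ≤ i) :
    pvF (some s :: rest) N i =
      (PySem.List.pyGetD (some s :: rest) (-1) none).getD "" ++ " " ++
        PySem.Int.toStr (i - (some s :: rest).length + 2) := by
  unfold pvF
  rw [PySem.List.pyGetD_zero_cons, if_pos (by simp), if_pos h]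

theorem get_categories_name_py_spec : Claim_equal_get_categories_name_py := by
  intro label N _ hpre
  unfold Spec_get_categories_name_py
  rw [get_categories_name_py_eq_map]
  unfold get_categories_name_py_alt
  by_cases hN : N ≤ 0
  · simp [hN, PySem.List.pyRange_one_eq_nil (by omega : N ≤ 0)]
  · rw [if_neg hN]
    rcases hpre with h0 | ⟨hne, hrest⟩
    · omega
    rcases label with _ | ⟨x, rest⟩
    · exact absurd rfl hne
    have hget : PySem.List.pyGetD (x :: rest) 0 none = x := PySem.List.pyGetD_zero_cons x rest none
    rcases hrest with hhd | hall
    · -- label[0] is None: both produce 'Category 1' … 'Category N'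
      simp only [List.head?_cons, Option.some.injEq] at hhd
      subst hhd
      rw [if_pos hget]
      unfold pvFill
      refine List.map_congr_left fun i _ => ?_
      rw [pvF_cat]
      rfl
    · -- label[0] is not None
      have hx : x ≠ none := by
        refine hall x ?_
        rw [show N.toNat = (N.toNat - 1) + 1 from by omega, List.take_succ_cons]
        exact List.mem_cons_self
      obtain ⟨s, rfl⟩ : ∃ s, x = some s := Option.ne_none_iff_exists'.mp hx
      rw [if_neg (by simp [hget])]
      rw [PySem.List.slice_to _ (by omega : (0:Int) ≤ N)]
      by_cases hge : N ≤ ((some s :: rest).length : Int)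
      · -- enough labels: the truncated copy is already full, return it
        have hge' : N ≤ (rest.length : Int) + 1 := by simpa using hge
        rw [if_pos (by simp only [List.length_map, List.length_take, List.length_cons]; omega)]
        apply List.ext_getElem
        · simp only [List.length_map, PySem.List.length_pyRange_one, List.length_take,
            List.length_cons]
          omega
        · intro k hk1 hk2
          have hkN : (k : Int) < N := by
            have := hk1; simp [PySem.List.length_pyRange_one] at this; omega
          have hklen : k < (some s :: rest).length := by
            simp only [List.length_cons]; omega
          simp only [List.getElem_map, PySem.List.getElem_pyRange_one, List.getElem_take]
          rw [pvF_idx s rest N _ (by simp only [List.length_cons]; push_cast; omega),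
            zero_add, PySem.List.pyGetD_natCast,
            List.getD_eq_getElem?_getD, List.getElem?_eq_getElem hklen]
          rfl
      · -- len(label) < N: pop the last label, preallocated tail 'label[-1] (i+1)'
        have hlt : ((rest.length : Int)) + 1 < N := by
          have := not_le.mp hge; simpa using this
        have htake : (some s :: rest).take N.toNat = some s :: rest :=
          List.take_of_length_le (by simp only [List.length_cons]; omega)
        rw [htake]
        rw [if_neg (by simp only [List.length_map, List.length_cons]; omega)]
        have hbase : ((some s :: rest).map (fun o => o.getD "")).getLastD "" =
            (PySem.List.pyGetD (some s :: rest) (-1) none).getD "" := by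
          rw [PySem.List.pyGetD_neg_one _ _ (by simp), List.getLastD_eq_getLast?,
            List.getLast?_map, List.getLast?_eq_some_getLast (by simp)]
          rfl
        rw [hbase, ← List.map_dropLast]
        have hdl : (((some s :: rest).dropLast.map (fun o => o.getD "")).length : Int)
            = (rest.length : Int) := by simp
        rw [hdl]
        unfold pvFill
        rw [PySem.List.pyRange_one_append 0 (rest.length : Int) N (by omega) (by omega),
          List.map_append]
        congr 1
        · -- indices 0 .. len-2 : label[i] verbatim
          apply List.ext_getElem
          · simp [PySem.List.length_pyRange_one]
          · intro k hk1 hk2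
            have hkb : (k : Int) < (rest.length : Int) := by
              have := hk1; simp [PySem.List.length_pyRange_one] at this; omega
            have hklen : k < (some s :: rest).length := by
              simp only [List.length_cons]; omega
            simp only [List.getElem_map, PySem.List.getElem_pyRange_one, List.getElem_dropLast]
            rw [pvF_idx s rest N _ (by simp only [List.length_cons]; push_cast; omega),
              zero_add, PySem.List.pyGetD_natCast,
              List.getD_eq_getElem?_getD, List.getElem?_eq_getElem hklen]
            rfl
        · -- indices len-1 .. N-1 : 'label[-1] (k+1)'
          apply List.ext_getElem
          · simp [PySem.List.length_pyRange_one]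
          · intro k hk1 hk2
            have hkb : (rest.length : Int) + (k : Int) < N := by
              have := hk1; simp [PySem.List.length_pyRange_one] at this; omega
            simp only [List.getElem_map, PySem.List.getElem_pyRange_one]
            rw [pvF_tail s rest N _ (by simp only [List.length_cons]; push_cast; omega)]
            rw [show (rest.length : Int) + (k : Int) - ((some s :: rest).length : Int) + 2
              = (0 : Int) + (k : Int) + 1 from by simp only [List.length_cons]; push_cast; omega]
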